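-- pv_equiv track=rewrite | github.com/kterna/astrbot_plugin_majsoul-master | utils/generate_hands.py | count_tiles
-- ===== SOURCE A (Python) =====
-- from typing import Dict, List, Tuple
--
-- def count_tiles(hand_str: str) -> Dict[str, int]:
--     """统计手牌中各种牌的数量"""
--     tile_counts = {}
--     current_numbers = ""
--
--     for char in hand_str:
--         if char.isdigit():
--             current_numbers += char
--         elif char in 'mpsz':
--             for number in current_numbers:
--                 tile_key = f"{number}{char}"
--                 tile_counts[tile_key] = tile_counts.get(tile_key, 0) + 1
--             current_numbers = ""
--
--     return tile_counts
-- ===== SOURCE B (Python) =====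
-- def count_tiles(hand_str: str):
--     """统计手牌中各种牌的数量"""
--     # phase 1: tokenize into (segment, suit) pairs; a segment is everything
--     # since the previous suit letter (digits are filtered out in phase 2).
--     tokens = []
--     seg = []
--     for ch in hand_str:
--         if ch in 'mpsz':
--             tokens.append((seg, ch))
--             seg = []
--         else:
--             seg.append(ch)
--     # phase 2: count one tile per digit in each segment
--     counts = {}
--     for segment, suit in tokens:
--         for d in segment:
--             if d.isdigit():
--                 key = f"{d}{suit}"
--                 counts[key] = counts.get(key, 0) + 1
--     return counts
-- ===== Notes on version B (the rewrite author's own statement) =====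
-- stated objective: idiomatic
-- what changed: Replaces A's single-pass accumulator scan (pending digit buffer mutated in place) with a two-phase decomposition: first tokenize the string into (segment, suit) pairs at each suit letter, then count one tile per digit found in each segment.
import Mathlib
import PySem

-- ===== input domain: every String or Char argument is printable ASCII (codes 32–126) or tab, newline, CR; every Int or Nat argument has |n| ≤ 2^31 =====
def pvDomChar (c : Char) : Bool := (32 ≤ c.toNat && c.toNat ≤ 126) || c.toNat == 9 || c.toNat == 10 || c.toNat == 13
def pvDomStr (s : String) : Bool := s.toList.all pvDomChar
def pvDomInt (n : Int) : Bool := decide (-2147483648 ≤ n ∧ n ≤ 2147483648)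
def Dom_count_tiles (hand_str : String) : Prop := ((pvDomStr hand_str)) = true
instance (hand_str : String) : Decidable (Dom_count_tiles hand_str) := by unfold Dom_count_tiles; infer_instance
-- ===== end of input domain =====

-- B replaces A's single accumulator scan by a tokenize-then-count two-phase decomposition (objective: alternative/idiomatic; same cost).

-- ===== PORT A =====
-- A's loop body: state = (tile_counts, current_numbers)
def pvStepA (st : PySem.Dict String Int × List Char) (c : Char) :
    PySem.Dict String Int × List Char :=
  if PySem.Chars.isdigit c then (st.1, st.2 ++ [c])
  else if c ∈ ['m', 'p', 's', 'z'] then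
    (st.2.foldl (fun d n =>
        d.insert (String.ofList [n, c]) (d.getD (String.ofList [n, c]) 0 + 1)) st.1, [])
  else st

def count_tiles (hand_str : String) : List (String × Int) :=
  (hand_str.toList.foldl pvStepA (PySem.Dict.empty, [])).1.items

-- ===== PORT B =====
-- B phase 1: tokenizer loop body: state = (tokens, seg)
def pvStepT (st : List (List Char × Char) × List Char) (c : Char) :
    List (List Char × Char) × List Char :=
  if c ∈ ['m', 'p', 's', 'z'] then (st.1 ++ [(st.2, c)], [])
  else (st.1, st.2 ++ [c])

-- B phase 2: count the digits of one (segment, suit) token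
def pvCountToken (d : PySem.Dict String Int) (t : List Char × Char) :
    PySem.Dict String Int :=
  t.1.foldl (fun d n =>
    if PySem.Chars.isdigit n then
      d.insert (String.ofList [n, t.2]) (d.getD (String.ofList [n, t.2]) 0 + 1)
    else d) d

def count_tiles_alt (hand_str : String) : List (String × Int) :=
  ((hand_str.toList.foldl pvStepT ([], [])).1.foldl pvCountToken PySem.Dict.empty).items

-- ===== PRECONDITION & SPEC =====
def Spec_count_tiles (hand_str : String) (out : List (String × Int)) : Prop := out = count_tiles_alt hand_str
instance (hand_str : String) (out : List (String × Int)) : Decidable (Spec_count_tiles hand_str out) := by unfold Spec_count_tiles; infer_instance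

-- ===== CLAIM (what is proved, stated in full; the proofs are below) =====
def Claim_equal_count_tiles : Prop := ∀ (hand_str : String), Dom_count_tiles hand_str → Spec_count_tiles hand_str (count_tiles hand_str)

-- ===== LEMMAS AND PROOFS =====

-- the tokenizer's accumulated-tokens component is the already-collected tokens ++ the rest
theorem pv_tok_acc (l : List Char) (acc : List (List Char × Char)) (p : List Char) :
    l.foldl pvStepT (acc, p) =
      (acc ++ (l.foldl pvStepT ([], p)).1, (l.foldl pvStepT ([], p)).2) := by
  induction l generalizing acc p with
  | nil => simp
  | cons c l ih =>
    by_cases h : c ∈ ['m', 'p', 's', 'z']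
    · simp only [List.foldl_cons, pvStepT, h, if_pos, List.nil_append]
      rw [ih (acc ++ [(p, c)]) [], ih [(p, c)] []]; simp
    · simp only [List.foldl_cons, pvStepT, h, if_neg, Bool.false_eq_true, if_false]
      rw [ih acc (p ++ [c]), ih [] (p ++ [c])]

-- counting a token = counting its digit sublist with A's inner loop body
theorem pv_count_token_filter (d : PySem.Dict String Int) (p : List Char) (c : Char) :
    pvCountToken d (p, c) =
      (p.filter PySem.Chars.isdigit).foldl (fun d n =>
        d.insert (String.ofList [n, c]) (d.getD (String.ofList [n, c]) 0 + 1)) d := by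
  unfold pvCountToken
  rw [← PySem.List.foldl_if_eq_foldl_filter]

-- invariant: A's run from (d, digits of p) = phase-2 fold of the tokens produced from pending p
theorem pv_main (l : List Char) (d : PySem.Dict String Int) (p : List Char) :
    (l.foldl pvStepA (d, p.filter PySem.Chars.isdigit)).1 =
      (l.foldl pvStepT ([], p)).1.foldl pvCountToken d := by
  induction l generalizing d p with
  | nil => simp
  | cons c l ih =>
    by_cases hm : c ∈ ['m', 'p', 's', 'z']
    · have hd : PySem.Chars.isdigit c = false := by
        fin_cases hm <;> decide
      simp only [List.foldl_cons, pvStepA, pvStepT, hd, hm,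
        Bool.false_eq_true, if_false, if_pos, List.nil_append]
      rw [pv_tok_acc l [(p, c)] [], List.foldl_append]
      have := ih ((p.filter PySem.Chars.isdigit).foldl (fun d n =>
        d.insert (String.ofList [n, c]) (d.getD (String.ofList [n, c]) 0 + 1)) d) []
      simp only [List.filter_nil] at this
      rw [this]
      simp [pv_count_token_filter]
    · by_cases hd : PySem.Chars.isdigit c
      · have : p.filter PySem.Chars.isdigit ++ [c] = (p ++ [c]).filter PySem.Chars.isdigit := by
          simp [List.filter_append, hd]
        simp only [List.foldl_cons, pvStepA, pvStepT, hd, hm, if_pos, if_neg,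
          Bool.false_eq_true, if_false]
        rw [this, ih]
      · simp only [List.foldl_cons, pvStepA, pvStepT, hd, hm, ite_false, if_neg,
          Bool.false_eq_true, if_false]
        have : p.filter PySem.Chars.isdigit = (p ++ [c]).filter PySem.Chars.isdigit := by
          simp [List.filter_append, hd]
        rw [this, ih]

-- ===== VERDICT (by name: the statement is the Claim_ definition above) =====
theorem count_tiles_spec : Claim_equal_count_tiles := by
  intro s _
  unfold Spec_count_tiles count_tiles count_tiles_alt
  have := pv_main s.toList PySem.Dict.empty []
  simp only [List.filter_nil] at this
  rw [this]
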